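-- pv_equiv track=rewrite | github.com/openimis/openimis-be-report-mauritania_py | reportmauritania/models.py | _convert_nn_fr
-- ===== SOURCE A (Python) =====
-- to_19_fr = (
--     'zéro', 'un', 'deux', 'trois', 'quatre', 'cinq', 'six',
--     'sept', 'huit', 'neuf', 'dix', 'onze', 'douze', 'treize',
--     'quatorze', 'quinze', 'seize', 'dix-sept', 'dix-huit', 'dix-neuf'
-- )
--
-- tens_fr  = (
--     'vingt', 'trente', 'quarante', 'cinquante', 'soixante', 'soixante',
--     'quatre-vingts', 'quatre-vingt'
-- )
--
-- def _convert_nn_fr(val):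
--     """
--     \brief       convert a value < 100 to French
--     \param  val  value to convert
--     """
--     if val < 20:
--         return to_19_fr[val]
--     for (dcap, dval) in ((k, 20 + (10 * v)) for (v, k) in enumerate(tens_fr)):
--         if dval + 10 > val:
--             if dval in (70,90):
--                 return dcap + '-' + to_19_fr[val % 10 + 10]
--             if val % 10:
--                 return dcap + '-' + to_19_fr[val % 10]
--             return dcap
-- ===== SOURCE B (Python) =====
-- to_19_fr = (
--     'zéro', 'un', 'deux', 'trois', 'quatre', 'cinq', 'six',
--     'sept', 'huit', 'neuf', 'dix', 'onze', 'douze', 'treize',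
--     'quatorze', 'quinze', 'seize', 'dix-sept', 'dix-huit', 'dix-neuf'
-- )
--
-- tens_fr  = (
--     'vingt', 'trente', 'quarante', 'cinquante', 'soixante', 'soixante',
--     'quatre-vingts', 'quatre-vingt'
-- )
--
-- def _convert_nn_fr(val):
--     if val < 20:
--         return to_19_fr[val]
--     tens, unit = divmod(val, 10)
--     dcap = tens_fr[tens - 2]
--     if tens in (7, 9):
--         return dcap + '-' + to_19_fr[unit + 10]
--     if unit:
--         return dcap + '-' + to_19_fr[unit]
--     return dcap
-- ===== Notes on version B (the rewrite author's own statement) =====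
-- stated objective: simpler
-- what changed: Replaces the enumerate-based linear bucket-search loop over tens_fr with a direct divmod computation: the tens digit indexes tens_fr arithmetically and the soixante-dix/quatre-vingt-dix special case tests the tens digit directly, no loop at all.
-- outside the precondition, e.g. on _convert_nn_fr(100): A returns None, B raises IndexError
import Mathlib
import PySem

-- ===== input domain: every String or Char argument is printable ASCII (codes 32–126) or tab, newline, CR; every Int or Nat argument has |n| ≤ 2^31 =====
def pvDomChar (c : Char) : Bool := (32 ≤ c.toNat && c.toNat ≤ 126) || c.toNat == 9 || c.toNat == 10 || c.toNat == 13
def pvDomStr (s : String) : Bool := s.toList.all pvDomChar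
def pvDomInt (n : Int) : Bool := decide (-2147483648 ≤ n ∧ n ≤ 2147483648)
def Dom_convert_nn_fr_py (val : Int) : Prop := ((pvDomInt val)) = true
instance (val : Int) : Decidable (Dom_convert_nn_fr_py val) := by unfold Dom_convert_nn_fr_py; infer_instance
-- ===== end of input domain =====

-- B replaces A's linear bucket-search loop over tens_fr with a direct divmod index; objective: simpler.


def to19Fr : List String :=
  ["zéro", "un", "deux", "trois", "quatre", "cinq", "six",
   "sept", "huit", "neuf", "dix", "onze", "douze", "treize",
   "quatorze", "quinze", "seize", "dix-sept", "dix-huit", "dix-neuf"]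

def tensFr : List String :=
  ["vingt", "trente", "quarante", "cinquante", "soixante", "soixante",
   "quatre-vingts", "quatre-vingt"]

-- ===== PORT A =====
-- A's for-loop over enumerate(tens_fr); returns none when the loop falls through (Python's None).
-- to_19_fr[…] lookups use PySem.List.pyGet? (Python negative indexing); .getD "" only where Pre_ guarantees in-range.
def convertLoopA (val : Int) : List (Int × String) → Option String
  | [] => none
  | (v, dcap) :: rest =>
    let dval : Int := 20 + 10 * v
    if dval + 10 > val then
      if dval = 70 ∨ dval = 90 then
        some (dcap ++ "-" ++ (PySem.List.pyGet? to19Fr (PySem.Int.mod val 10 + 10)).getD "")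
      else if PySem.Int.mod val 10 ≠ 0 then
        some (dcap ++ "-" ++ (PySem.List.pyGet? to19Fr (PySem.Int.mod val 10)).getD "")
      else some dcap
    else convertLoopA val rest

def convert_nn_fr_py (val : Int) : String :=
  if val < 20 then (PySem.List.pyGet? to19Fr val).getD ""
  else (convertLoopA val (PySem.List.enumerate tensFr)).getD ""

-- ===== PORT B =====
def convert_nn_fr_py_alt (val : Int) : String :=
  if val < 20 then (PySem.List.pyGet? to19Fr val).getD ""
  else
    let tens := PySem.Int.floordiv val 10
    let unit := PySem.Int.mod val 10
    let dcap := (PySem.List.pyGet? tensFr (tens - 2)).getD ""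
    if tens = 7 ∨ tens = 9 then dcap ++ "-" ++ (PySem.List.pyGet? to19Fr (unit + 10)).getD ""
    else if unit ≠ 0 then dcap ++ "-" ++ (PySem.List.pyGet? to19Fr unit).getD ""
    else dcap

-- ===== PRECONDITION & SPEC =====
-- Pre_ excludes the values below the reach of Python's negative indexing, where A raises IndexError
-- on the to_19_fr lookup, and the values of one hundred or more, where A's loop falls through and
-- returns None, not a string; B raises IndexError on both kinds of input.
def Pre_convert_nn_fr_py (val : Int) : Prop := -20 ≤ val ∧ val < 100
instance (val : Int) : Decidable (Pre_convert_nn_fr_py val) := by unfold Pre_convert_nn_fr_py; infer_instance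
def pvWitness_convert_nn_fr_py : Int := (42)
def Spec_convert_nn_fr_py (val : Int) (out : String) : Prop := out = convert_nn_fr_py_alt val
instance (val : Int) (out : String) : Decidable (Spec_convert_nn_fr_py val out) := by unfold Spec_convert_nn_fr_py; infer_instance

-- ===== CLAIM (what is proved, stated in full; the proofs are below) =====
def Claim_equal_convert_nn_fr_py : Prop := ∀ (val : Int), Dom_convert_nn_fr_py val → Pre_convert_nn_fr_py val → Spec_convert_nn_fr_py val (convert_nn_fr_py val)

-- ===== LEMMAS AND PROOFS =====

lemma convert_nn_fr_all : ∀ k : Fin 120,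
    convert_nn_fr_py ((k : Int) - 20) = convert_nn_fr_py_alt ((k : Int) - 20) := by decide

-- ===== VERDICT (by name: the statement is the Claim_ definition above) =====
theorem convert_nn_fr_py_spec : Claim_equal_convert_nn_fr_py := by
  intro val _ hpre
  unfold Spec_convert_nn_fr_py
  obtain ⟨h1, h2⟩ := hpre
  have hk : (val + 20).toNat < 120 := by omega
  have h := convert_nn_fr_all ⟨(val + 20).toNat, hk⟩
  have hc : (((val + 20).toNat : Nat) : Int) - 20 = val := by omega
  rw [hc] at h
  exact h
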